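-- pv_equiv track=rewrite | github.com/dlee533/comp1510-programming-methods | Assignments/A4/question_8.py | find_most_bar
-- ===== SOURCE A (Python) =====
-- def find_most_bar(time_list: list) -> tuple:
--     """find the most bar
--
--     :param time_list: a list
--     :precondition: time_list must be a list consists of sub lists that contains strings for each
--     time it represents
--     :postcondition: for each item in sublist, insert a key value pair to another dictionary,
--     with key being the time and value, the number of bars it requires to form the time
--     :return: tuple
--     """
--     segments_dict = {'0': 6, '1': 2, '2': 5, '3': 5, '4': 4, '5': 5, '6': 6, '7': 3, '8': 7, '9': 6}
--     segments = {}
--     for i, time in enumerate(time_list):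
--         segments[i] = 0
--         for my_str in list(time):
--             segments[i] += segments_dict[my_str]
--     most_segment = max(segments.values())
--     most_segment_time = list(segments.keys())[list(segments.values()).index(most_segment)]
--     most_segment_time = str(most_segment_time)
--     return (most_segment_time if most_segment < 9 else "0"+most_segment_time), most_segment
-- ===== SOURCE B (Python) =====
-- def find_most_bar(time_list: list) -> tuple:
--     """find the most bar: single running-max pass instead of dict + max + .index."""
--     segments_dict = {'0': 6, '1': 2, '2': 5, '3': 5, '4': 4, '5': 5, '6': 6, '7': 3, '8': 7, '9': 6}
--     best_value = None
--     best_index = 0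
--     for i, time in enumerate(time_list):
--         total = sum(segments_dict[my_str] for my_str in time)
--         if best_value is None or total > best_value:
--             best_value, best_index = total, i
--     if best_value is None:
--         raise ValueError("max() arg is an empty sequence")
--     text = str(best_index)
--     return ("0" + text if best_value >= 9 else text), best_value
-- ===== Notes on version B (the rewrite author's own statement) =====
-- stated objective: simpler
-- what changed: Replaces A's index-keyed dict plus separate max() and .index() passes with one enumerate loop keeping a running (best_value, best_index), strict '>' preserving first-max tie-breaking.
import Mathlib
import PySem

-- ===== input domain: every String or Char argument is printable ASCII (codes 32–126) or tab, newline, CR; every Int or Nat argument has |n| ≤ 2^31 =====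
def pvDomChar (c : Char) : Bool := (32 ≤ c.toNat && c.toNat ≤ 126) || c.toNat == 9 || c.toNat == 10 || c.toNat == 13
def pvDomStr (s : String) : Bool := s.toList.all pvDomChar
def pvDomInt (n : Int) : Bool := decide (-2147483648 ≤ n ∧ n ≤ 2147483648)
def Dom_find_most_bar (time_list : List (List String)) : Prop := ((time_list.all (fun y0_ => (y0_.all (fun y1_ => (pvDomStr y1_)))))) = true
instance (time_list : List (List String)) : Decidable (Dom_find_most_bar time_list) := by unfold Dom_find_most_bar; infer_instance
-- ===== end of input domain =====

-- B replaces A's index-keyed dict plus separate max()/.index() passes with one running-max loop (simpler; same O(n)).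


-- the seven-segment digit table, the same literal dict both Pythons define
def segmentsDict : PySem.Dict String Int :=
  PySem.Dict.ofList [("0",6),("1",2),("2",5),("3",5),("4",4),("5",5),("6",6),("7",3),("8",7),("9",6)]

-- ===== PORT A =====
def find_most_bar (time_list : List (List String)) : String × Int :=
  -- segments[i] built by the two nested loops; segments_dict[my_str] is getD (KeyError excluded by Pre_)
  let segments : PySem.Dict Int Int :=
    (PySem.List.enumerate time_list 0).foldl
      (fun d p =>
        p.2.foldl (fun d my_str => d.insert p.1 (d.getD p.1 0 + segmentsDict.getD my_str 0))
          (d.insert p.1 0))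
      PySem.Dict.empty
  -- max(segments.values()) raises on empty; excluded by Pre_, getD 0 is the total form
  let most_segment : Int := (PySem.List.max? segments.values (fun v => v)).getD 0
  let most_segment_time : Int :=
    PySem.List.pyGetD segments.keys
      (((PySem.List.index? segments.values most_segment).getD 0 : Nat) : Int) 0
  let t := PySem.Int.toStr most_segment_time
  ((if most_segment < 9 then t else "0" ++ t), most_segment)

-- ===== PORT B =====
def find_most_bar_alt (time_list : List (List String)) : String × Int :=
  let r :=
    (PySem.List.enumerate time_list 0).foldl
      (fun acc p =>
        let total : Int := (p.2.map (fun my_str => segmentsDict.getD my_str 0)).sum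
        match acc.1 with
        | none => (some total, p.1)
        | some v => if total > v then (some total, p.1) else acc)
      ((none : Option Int), (0 : Int))
  match r.1 with
  | none => ("", 0)  -- Python B raises ValueError here (empty time_list); excluded by Pre_
  | some v =>
      let text := PySem.Int.toStr r.2
      ((if v ≥ 9 then "0" ++ text else text), v)

-- ===== PRECONDITION & SPEC =====
-- A raises ValueError on an empty time_list and KeyError on any string that is not a single digit; both excluded.
def Pre_find_most_bar (time_list : List (List String)) : Prop :=
  time_list ≠ [] ∧ ∀ t ∈ time_list, ∀ s ∈ t, s ∈ ["0","1","2","3","4","5","6","7","8","9"]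
instance (time_list : List (List String)) : Decidable (Pre_find_most_bar time_list) := by
  unfold Pre_find_most_bar; infer_instance
def pvWitness_find_most_bar : List (List String) := [["1","2"],["8"]]

def Spec_find_most_bar (time_list : List (List String)) (out : String × Int) : Prop :=
  out = find_most_bar_alt time_list
instance (time_list : List (List String)) (out : String × Int) : Decidable (Spec_find_most_bar time_list out) := by
  unfold Spec_find_most_bar; infer_instance

-- ===== CLAIM (what is proved, stated in full; the proofs are below) =====
def Claim_equal_find_most_bar : Prop := ∀ (time_list : List (List String)), Dom_find_most_bar time_list → Pre_find_most_bar time_list → Spec_find_most_bar time_list (find_most_bar time_list)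

-- ===== LEMMAS AND PROOFS =====

-- per-time bar total
def barSum (t : List String) : Int := (t.map (fun s => segmentsDict.getD s 0)).sum

-- A's inner loop over one time, started right after `segments[i] = 0`-style insert
lemma innerLoop (l : List String) (d : PySem.Dict Int Int) (i v : Int) :
    l.foldl (fun d my_str => d.insert i (d.getD i 0 + segmentsDict.getD my_str 0)) (d.insert i v)
      = d.insert i (v + barSum l) := by
  induction l generalizing v with
  | nil => simp [barSum]
  | cons s l ih =>
      simp only [List.foldl_cons, PySem.Dict.insert_insert_self, PySem.Dict.getD_insert_self]
      rw [ih]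
      simp [barSum, add_assoc]

lemma enumerate_map_snd {α β : Type} (f : α → β) (xs : List α) (s : Int) :
    PySem.List.enumerate (xs.map f) s
      = (PySem.List.enumerate xs s).map (fun p => (p.1, f p.2)) := by
  induction xs generalizing s with
  | nil => simp [PySem.List.enumerate_nil]
  | cons x xs ih => simp [PySem.List.enumerate_cons, ih]

-- B's running-max fold over enumerate equals (max, first index of max)
lemma argmax_fold (xs : List Int) (hne : xs ≠ []) :
    (PySem.List.enumerate xs 0).foldl
        (fun acc (p : Int × Int) =>
          match acc.1 with
          | none => (some p.2, p.1)
          | some v => if p.2 > v then (some p.2, p.1) else acc)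
        ((none : Option Int), (0 : Int))
      = (PySem.List.max? xs (fun v => v),
         (((PySem.List.index? xs ((PySem.List.max? xs (fun v => v)).getD 0)).getD 0 : Nat) : Int)) := by
  induction xs using List.reverseRecOn with
  | nil => exact absurd rfl hne
  | append_singleton xs x ih =>
      rcases xs with _ | ⟨y, t⟩
      · simp [PySem.List.enumerate_cons, PySem.List.enumerate_nil, PySem.List.max?]
      · have hM : PySem.List.max? (y :: t) (fun v => v) = some (t.foldl max y) :=
          PySem.List.max?_id_cons y t
        have hM' : PySem.List.max? ((y :: t) ++ [x]) (fun v => v)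
            = some (max (t.foldl max y) x) := by
          rw [List.cons_append, PySem.List.max?_id_cons, List.foldl_append]
          simp
        rw [PySem.List.enumerate_append, List.foldl_append, ih (by simp)]
        rw [hM]
        simp only [PySem.List.enumerate_cons, PySem.List.enumerate_nil, List.foldl_cons,
          List.foldl_nil, hM']
        by_cases hx : x > t.foldl max y
        · simp only [hx, if_pos]
          have hmax : max (t.foldl max y) x = x := max_eq_right (le_of_lt hx)
          have hnotmem : x ∉ (y :: t) := by
            intro hmem
            have := (PySem.List.max?_isMax hM) x hmem
            simp at this; omega
          rw [hmax]
          simp only [Option.getD_some]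
          rw [PySem.List.index?_append_singleton_self _ _ hnotmem]
          simp
        · simp only [hx, if_neg, not_false_iff]
          have hmax : max (t.foldl max y) x = t.foldl max y := max_eq_left (by omega)
          have hmem : t.foldl max y ∈ (y :: t) :=
            PySem.List.max?_mem hM
          simp only [Option.getD_some]
          rw [hmax, PySem.List.index?_append_of_mem _ hmem]

lemma dict_eq (tl : List (List String)) :
    (PySem.List.enumerate tl 0).foldl
      (fun d p =>
        p.2.foldl (fun d my_str => d.insert p.1 (d.getD p.1 0 + segmentsDict.getD my_str 0))
          (d.insert p.1 0))
      PySem.Dict.empty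
    = (PySem.List.enumerate tl 0).foldl (fun d p => d.insert p.1 (barSum p.2)) PySem.Dict.empty := by
  apply PySem.List.foldl_congr_mem
  intro d p _
  rw [innerLoop]
  simp

lemma items_eq (tl : List (List String)) :
    ((PySem.List.enumerate tl 0).foldl (fun d p => d.insert p.1 (barSum p.2))
        PySem.Dict.empty).items
      = (PySem.List.enumerate tl 0).map (fun p => (p.1, barSum p.2)) := by
  have h := PySem.Dict.items_foldl_insert_fresh (l := PySem.List.enumerate tl 0)
      (k := fun p => p.1) (v := fun p => barSum p.2) (d := PySem.Dict.empty)
      (by intro a _; simp [PySem.Dict.contains_empty])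
      (by rw [PySem.List.map_fst_enumerate]; exact PySem.List.nodup_pyRange_one _ _)
  simpa using h

-- ===== VERDICT (by name: the statement is the Claim_ definition above) =====
theorem find_most_bar_spec : Claim_equal_find_most_bar := by
  intro tl _ hpre
  obtain ⟨hne, _⟩ := hpre
  unfold Spec_find_most_bar find_most_bar find_most_bar_alt
  simp only [dict_eq]
  have hkeys : ((PySem.List.enumerate tl 0).foldl (fun d p => d.insert p.1 (barSum p.2))
      PySem.Dict.empty).keys = PySem.List.pyRange 0 (tl.length : Int) 1 := by
    simp only [PySem.Dict.keys, items_eq, List.map_map]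
    have := PySem.List.map_fst_enumerate tl 0
    simpa using this
  have hvals : ((PySem.List.enumerate tl 0).foldl (fun d p => d.insert p.1 (barSum p.2))
      PySem.Dict.empty).values = tl.map barSum := by
    simp only [PySem.Dict.values, items_eq, List.map_map]
    have : ((PySem.List.enumerate tl 0).map (fun p => barSum p.2)) = tl.map barSum := by
      rw [show (fun p : Int × List String => barSum p.2)
            = barSum ∘ (fun p : Int × List String => p.2) from rfl,
        ← List.map_map, PySem.List.map_snd_enumerate]
    simpa using this
  rw [hkeys, hvals]
  -- B side: turn the fold over tl into the fold over the bar-sum list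
  have hBfold :
      (PySem.List.enumerate tl 0).foldl
        (fun acc p =>
          let total : Int := (p.2.map (fun my_str => segmentsDict.getD my_str 0)).sum
          match acc.1 with
          | none => (some total, p.1)
          | some v => if total > v then (some total, p.1) else acc)
        ((none : Option Int), (0 : Int))
      = (PySem.List.enumerate (tl.map barSum) 0).foldl
        (fun acc (p : Int × Int) =>
          match acc.1 with
          | none => (some p.2, p.1)
          | some v => if p.2 > v then (some p.2, p.1) else acc)
        ((none : Option Int), (0 : Int)) := by
    rw [enumerate_map_snd, List.foldl_map]
    rfl
  rw [hBfold, argmax_fold _ (by simpa using hne)]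
  -- name the max and its first index
  obtain ⟨M, hM⟩ : ∃ M, PySem.List.max? (tl.map barSum) (fun v => v) = some M := by
    cases h : PySem.List.max? (tl.map barSum) (fun v => v) with
    | none => exact absurd ((PySem.List.max?_eq_none_iff _ _).mp h) (by simpa using hne)
    | some m => exact ⟨m, rfl⟩
  have hMmem : M ∈ tl.map barSum := PySem.List.max?_mem hM
  obtain ⟨j, hj⟩ : ∃ j, PySem.List.index? (tl.map barSum) M = some j := by
    cases h : PySem.List.index? (tl.map barSum) M with
    | none => exact absurd ((PySem.List.index?_eq_none_iff _ _).mp h) (by simp [hMmem])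
    | some k => exact ⟨k, rfl⟩
  obtain ⟨hjlt, -, -⟩ := PySem.List.getElem_of_index?_eq_some hj
  rw [hM]
  simp only [Option.getD_some, hj]
  -- keys[j] = j
  have hkey : PySem.List.pyGetD (PySem.List.pyRange 0 (tl.length : Int) 1) ((j : Nat) : Int) 0
      = (j : Int) := by
    rw [PySem.List.pyGetD_natCast]
    have hjlt' : j < (PySem.List.pyRange 0 (tl.length : Int) 1).length := by
      rw [PySem.List.length_pyRange_one]
      simpa using hjlt
    rw [List.getD_eq_getElem _ _ hjlt', PySem.List.getElem_pyRange_one]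
    simp
  rw [hkey]
  by_cases h9 : M < 9
  · simp [h9, show ¬(9 ≤ M) from by omega]
  · simp [h9, show 9 ≤ M from by omega]
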